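-- pv_equiv track=rewrite | github.com/MomchilAngelov/telebit-pro | fast_tasks/sklad/solution.py | findDifferentGoods
-- ===== SOURCE A (Python) =====
-- def findDifferentGoods(matrix):
-- 	numberOfGoods = 0
-- 	prevFlagIndex = []
-- 	FlagIndex = []
--
-- 	for row in matrix:
-- 		subArr = []
-- 		for idx, value in enumerate(row):
-- 			if value > 0:
-- 				subArr.append(idx)
-- 			elif value == 0 and subArr:
-- 				FlagIndex.append(subArr[:])
-- 				subArr = []
-- 		if subArr:
-- 			FlagIndex.append(subArr[:])
-- 			subArr = []
--
--
--
-- 		for arr in prevFlagIndex: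
-- 			if arr not in FlagIndex:
-- 				numberOfGoods += 1
--
-- 		prevFlagIndex = FlagIndex
-- 		FlagIndex = []
--
-- 	numberOfGoods += len(prevFlagIndex)
--
-- 	return numberOfGoods
-- ===== SOURCE B (Python) =====
-- def findDifferentGoods(matrix):
--     # Group occurrences by segment instead of comparing adjacent rows:
--     # each maximal vertical run of an identical segment ends exactly once,
--     # so the answer is the number of run-ends, counted per distinct segment.
--     def segs(row):
--         out, cur = [], []
--         for i, v in enumerate(row + [0]):
--             if v == 0:
--                 if cur:
--                     out.append(tuple(cur))
--                 cur = []
--             elif v > 0: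
--                 cur.append(i)
--         return out
--
--     table = [segs(row) for row in matrix]
--     pairs = [(i, s) for i, t in enumerate(table) for s in t]
--     keys = []
--     for _, s in pairs:
--         if s not in keys:
--             keys.append(s)
--     total = 0
--     for k in keys:
--         rows = [i for i, s in pairs if s == k]
--         total += sum(1 for r in rows if r + 1 not in rows)
--     return total
-- ===== Notes on version B (the rewrite author's own statement) =====
-- stated objective: alternative
-- what changed: Replaces A's single interleaved pass comparing each row's segment list with the previous row's by a group-by-segment algorithm: collect all (row, segment) occurrences, group the row indices per distinct segment, and count for each segment the ends of its maximal vertical runs (rows r with r+1 absent from its row list).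
import Mathlib
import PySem

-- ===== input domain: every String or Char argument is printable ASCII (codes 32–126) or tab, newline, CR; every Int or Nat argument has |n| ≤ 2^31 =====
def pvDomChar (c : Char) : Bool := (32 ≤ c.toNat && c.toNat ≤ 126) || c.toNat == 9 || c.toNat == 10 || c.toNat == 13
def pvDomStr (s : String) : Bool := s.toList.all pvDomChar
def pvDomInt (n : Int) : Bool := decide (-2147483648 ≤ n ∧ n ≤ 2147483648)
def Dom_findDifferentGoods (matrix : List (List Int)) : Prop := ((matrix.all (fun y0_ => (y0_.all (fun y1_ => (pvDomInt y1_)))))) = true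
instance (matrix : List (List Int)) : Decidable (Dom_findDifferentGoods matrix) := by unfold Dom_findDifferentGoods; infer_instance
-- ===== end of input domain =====

-- B replaces A's interleaved adjacent-row comparison by a group-by-segment algorithm
-- (group row indices per distinct segment, count vertical run ends); objective:
-- alternative decomposition (no speed claim).

-- ===== PORT A =====
-- A's inner enumerate-loop body: state (subArr, FlagIndex)
def aRowStep (s : List Int × List (List Int)) (p : Int × Int) : List Int × List (List Int) :=
  if p.2 > 0 then (s.1 ++ [p.1], s.2)
  else if p.2 = 0 ∧ s.1 ≠ [] then ([], s.2 ++ [s.1])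
  else s

-- A's outer-loop body: state (numberOfGoods, prevFlagIndex)
def aOuterStep (st : Int × List (List Int)) (row : List Int) : Int × List (List Int) :=
  let inner := (PySem.List.enumerate row).foldl aRowStep ([], [])
  let flag := if inner.1 ≠ [] then inner.2 ++ [inner.1] else inner.2
  (st.2.foldl (fun n arr => if arr ∈ flag then n else n + 1) st.1, flag)

def findDifferentGoods (matrix : List (List Int)) : Int :=
  let fin := matrix.foldl aOuterStep (0, [])
  fin.1 + fin.2.length

-- ===== PORT B =====
-- B's segs loop body: state (out, cur); sentinel zero flushes the last run
def bRowStep (s : List (List Int) × List Int) (p : Int × Int) : List (List Int) × List Int :=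
  if p.2 = 0 then ((if s.2 ≠ [] then s.1 ++ [s.2] else s.1), [])
  else if p.2 > 0 then (s.1, s.2 ++ [p.1])
  else s

def bSegs (row : List Int) : List (List Int) :=
  ((PySem.List.enumerate (row ++ [0])).foldl bRowStep ([], [])).1

def findDifferentGoods_alt (matrix : List (List Int)) : Int :=
  let table := matrix.map bSegs
  let pairs := (PySem.List.enumerate table).flatMap (fun p => p.2.map (fun s => (p.1, s)))
  let keys := pairs.foldl (fun ks p => if p.2 ∈ ks then ks else ks ++ [p.2]) ([] : List (List Int))
  keys.foldl (fun total k =>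
    let rows := (pairs.filter (fun p => decide (p.2 = k))).map (fun p => p.1)
    total + (((rows.filter (fun r => decide ((r + 1) ∉ rows))).length : Int))) 0

-- ===== PRECONDITION & SPEC =====
def Spec_findDifferentGoods (matrix : List (List Int)) (out : Int) : Prop := out = findDifferentGoods_alt matrix
instance (matrix : List (List Int)) (out : Int) : Decidable (Spec_findDifferentGoods matrix out) := by unfold Spec_findDifferentGoods; infer_instance

-- ===== CLAIM (what is proved, stated in full; the proofs are below) =====
def Claim_equal_findDifferentGoods : Prop := ∀ (matrix : List (List Int)), Dom_findDifferentGoods matrix → Spec_findDifferentGoods matrix (findDifferentGoods matrix)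

-- ===== LEMMAS AND PROOFS =====

-- number of segments of t absent from nxt
def cntN (t nxt : List (List Int)) : Nat := t.countP (fun s => decide (s ∉ nxt))

-- reference value: per row, the segments absent from the following row (last row vs [])
def ends : List (List (List Int)) → Nat
  | [] => 0
  | t :: ts => cntN t (ts.headD []) + ends ts

-- all (row index, segment) occurrences of a table
def pairsOf (T : List (List (List Int))) : List (Int × List Int) :=
  (PySem.List.enumerate T).flatMap (fun p => p.2.map (fun s => (p.1, s)))

-- row indices of the occurrences of segment s
def rowsOf (P : List (Int × List Int)) (s : List Int) : List Int :=
  (P.filter (fun p => decide (p.2 = s))).map (fun p => p.1)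

-- B's first-occurrence key accumulation step
def keyStep (ks : List (List Int)) (p : Int × List Int) : List (List Int) :=
  if p.2 ∈ ks then ks else ks ++ [p.2]

-- ---- A's value equals ends (matrix.map bSegs) ----

lemma bRowStep_swap (s : List Int × List (List Int)) (p : Int × Int) :
    bRowStep (s.2, s.1) p = ((aRowStep s p).2, (aRowStep s p).1) := by
  rcases s with ⟨cur, out⟩
  simp only [bRowStep, aRowStep]
  rcases lt_trichotomy p.2 0 with h | h | h
  · simp [not_lt.mpr h.le, h.ne]
  · rcases eq_or_ne cur [] with hc | hc <;> simp [h, hc]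
  · simp [h, h.ne']

lemma foldl_bRowStep_swap (l : List (Int × Int)) (s : List Int × List (List Int)) :
    l.foldl bRowStep (s.2, s.1) = ((l.foldl aRowStep s).2, (l.foldl aRowStep s).1) := by
  induction l generalizing s with
  | nil => rfl
  | cons p l ih => simpa [bRowStep_swap] using ih (aRowStep s p)

lemma bSegs_eq_aSeg (row : List Int) :
    bSegs row =
      (let inner := (PySem.List.enumerate row).foldl aRowStep ([], []);
       if inner.1 ≠ [] then inner.2 ++ [inner.1] else inner.2) := by
  simp only [bSegs, PySem.List.enumerate_append, List.foldl_append]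
  rw [show (([], []) : List (List Int) × List Int) = ((([], []) : List Int × List (List Int)).2, (([], []) : List Int × List (List Int)).1) from rfl,
    foldl_bRowStep_swap]
  set inner := (PySem.List.enumerate row).foldl aRowStep (([], []) : List Int × List (List Int))
  simp only [PySem.List.enumerate_nil, PySem.List.enumerate_cons, List.foldl_cons, List.foldl_nil]
  rcases eq_or_ne inner.1 [] with h | h <;> simp [bRowStep, h]

lemma aCount_eq (prev flag : List (List Int)) (n : Int) :
    prev.foldl (fun n arr => if arr ∈ flag then n else n + 1) n = n + (cntN prev flag : Int) := by
  have h1 : prev.foldl (fun n arr => if arr ∈ flag then n else n + 1) n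
      = prev.foldl (fun n arr => if arr ∉ flag then n + 1 else n) n :=
    PySem.List.foldl_congr_mem prev _ _ n (by intro acc x _; by_cases h : x ∈ flag <;> simp [h])
  rw [h1, PySem.List.foldl_ite_add_one]
  rfl

lemma main_loop (rs : List (List Int)) (n : Int) (prev : List (List Int)) :
    (rs.foldl aOuterStep (n, prev)).1 + ((rs.foldl aOuterStep (n, prev)).2.length : Int)
      = n + (cntN prev ((rs.map bSegs).headD []) : Int) + (ends (rs.map bSegs) : Int) := by
  induction rs generalizing n prev with
  | nil => simp [ends, cntN]
  | cons r rs ih =>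
      have hstep : aOuterStep (n, prev) r = (n + (cntN prev (bSegs r) : Int), bSegs r) := by
        simp only [aOuterStep, bSegs_eq_aSeg, aCount_eq]
      rw [List.foldl_cons, hstep, ih]
      simp [ends]
      ring

lemma a_eq_ends (matrix : List (List Int)) :
    findDifferentGoods matrix = (ends (matrix.map bSegs) : Int) := by
  have h := main_loop matrix 0 []
  simpa [findDifferentGoods, cntN] using h

-- ---- B's value equals ends (matrix.map bSegs) ----

lemma mem_rowsOf (P : List (Int × List Int)) (j : Int) (s : List Int) :
    j ∈ rowsOf P s ↔ (j, s) ∈ P := by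
  simp only [rowsOf, List.mem_map, List.mem_filter, decide_eq_true_eq]
  constructor
  · rintro ⟨p, ⟨hp, h2⟩, h1⟩
    rwa [show (j, s) = p by rw [← h1, ← h2]]
  · intro h; exact ⟨(j, s), ⟨h, rfl⟩, rfl⟩

lemma mem_pairsOf (T : List (List (List Int))) (j : Int) (s : List Int) :
    (j, s) ∈ pairsOf T ↔ ∃ k : Nat, ∃ h : k < T.length, j = (k : Int) ∧ s ∈ T[k] := by
  simp only [pairsOf, List.mem_flatMap, List.mem_map, PySem.List.mem_enumerate_iff,
    Prod.mk.injEq, Prod.exists]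
  constructor
  · rintro ⟨a, b, ⟨k, hk, ha, hb⟩, s', hs', hj, hs⟩
    refine ⟨k, hk, by omega, ?_⟩
    subst hb hs
    exact hs'
  · rintro ⟨k, hk, hj, hs⟩
    exact ⟨0 + (k : Int), T[k], ⟨k, hk, rfl, rfl⟩, s, hs, by omega, rfl⟩

lemma keys_sub : ∀ (P : List (Int × List Int)) (acc : List (List Int)),
    acc ⊆ P.foldl keyStep acc := by
  intro P
  induction P with
  | nil => intro acc; simp
  | cons p P ih =>
      intro acc
      refine List.Subset.trans ?_ (ih (keyStep acc p))
      unfold keyStep; split_ifs <;> simp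

lemma keys_mem : ∀ (P : List (Int × List Int)) (acc : List (List Int)),
    ∀ p ∈ P, p.2 ∈ P.foldl keyStep acc := by
  intro P
  induction P with
  | nil => simp
  | cons q P ih =>
      intro acc p hp
      rcases List.mem_cons.mp hp with h | h
      · subst h
        refine keys_sub P (keyStep acc p) ?_
        unfold keyStep; split_ifs with h' <;> simp [h']
      · exact ih (keyStep acc q) p h

lemma keys_nodup : ∀ (P : List (Int × List Int)) (acc : List (List Int)),
    acc.Nodup → (P.foldl keyStep acc).Nodup := by
  intro P
  induction P with
  | nil => intro acc h; simpa using h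
  | cons p P ih =>
      intro acc h
      refine ih _ ?_
      unfold keyStep; split_ifs with h'
      · exact h
      · simpa [List.nodup_append] using ⟨h, fun a ha e => h' (e ▸ ha)⟩

lemma countP_split (h q : Int × List Int → Bool) (l : List (Int × List Int)) :
    l.countP h = (l.filter q).countP h + (l.filter (fun a => !q a)).countP h := by
  induction l with
  | nil => simp
  | cons a l ih =>
      by_cases hq : q a = true <;>
        simp [hq, List.countP_cons, ih] <;> omega

lemma group_countP (h : Int × List Int → Bool) :
    ∀ (keys : List (List Int)) (P : List (Int × List Int)), keys.Nodup →
      (∀ p ∈ P, p.2 ∈ keys) →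
      (keys.map (fun k => (P.filter (fun p => decide (p.2 = k))).countP h)).sum = P.countP h := by
  intro keys
  induction keys with
  | nil =>
      intro P _ hall
      cases P with
      | nil => simp
      | cons p P => exact absurd (hall p (List.mem_cons_self ..)) (by simp)
  | cons k ks ih =>
      intro P hnd hall
      have hk : k ∉ ks := (List.nodup_cons.mp hnd).1
      have hnd' : ks.Nodup := (List.nodup_cons.mp hnd).2
      have hmap : ∀ k' ∈ ks,
          (P.filter (fun p => decide (p.2 = k'))).countP h
            = ((P.filter (fun p => !decide (p.2 = k))).filter (fun p => decide (p.2 = k'))).countP h := by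
        intro k' hk'
        have hne : k' ≠ k := fun e => hk (e ▸ hk')
        congr 1
        rw [List.filter_filter]
        refine (List.filter_congr ?_).symm
        intro p _
        by_cases hp : p.2 = k'
        · simp [hp, hne]
        · simp [hp]
      rw [List.map_cons, List.sum_cons, List.map_congr_left hmap,
        ih _ hnd' (by
          intro p hp
          have := hall p (List.mem_filter.mp hp).1
          have h2 := (List.mem_filter.mp hp).2
          simp only [Bool.not_eq_true', decide_eq_false_iff_not] at h2
          rcases List.mem_cons.mp this with e | e
          · exact absurd e h2
          · exact e),
        ← countP_split h (fun p => decide (p.2 = k)) P]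

lemma mem_getD (T : List (List (List Int))) (m : Nat) (s : List Int) :
    s ∈ T.getD m [] ↔ ∃ h : m < T.length, s ∈ T[m] := by
  by_cases h : m < T.length
  · simp [List.getD_eq_getElem?_getD, h]
  · simp [List.getD_eq_getElem?_getD, h]

lemma lookup_rowsOf (T : List (List (List Int))) (m : Nat) (s : List Int) :
    ((m : Int) ∈ rowsOf (pairsOf T) s) ↔ s ∈ T.getD m [] := by
  rw [mem_rowsOf, mem_pairsOf, mem_getD]
  constructor
  · rintro ⟨k, hk, he, hs⟩
    have hmk : m = k := by exact_mod_cast he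
    subst hmk
    exact ⟨hk, hs⟩
  · rintro ⟨hm, hs⟩
    exact ⟨m, hm, rfl, hs⟩

lemma countP_chunk (T : List (List (List Int))) (n : Nat) (t : List (List Int)) :
    ((t.map (fun s => ((n : Int), s))).countP
        (fun p => decide ((p.1 + 1) ∉ rowsOf (pairsOf T) p.2)))
      = cntN t (T.getD (n + 1) []) := by
  rw [List.countP_map, cntN]
  refine List.countP_congr ?_
  intro s _
  simp only [Function.comp, decide_eq_true_eq,
    show ((n : Int) + 1) = ((n + 1 : Nat) : Int) by push_cast; ring, lookup_rowsOf]

lemma step3 (T : List (List (List Int))) :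
    ∀ (ts : List (List (List Int))) (n : Nat),
      (∀ j : Nat, T.getD (n + j) [] = ts.getD j []) →
      (((PySem.List.enumerate ts (n : Int)).flatMap
          (fun p => p.2.map (fun s => (p.1, s)))).countP
        (fun p => decide ((p.1 + 1) ∉ rowsOf (pairsOf T) p.2))) = ends ts := by
  intro ts
  induction ts with
  | nil => intro n _; simp [ends]
  | cons t ts ih =>
      intro n hsuf
      rw [PySem.List.enumerate_cons, List.flatMap_cons, List.countP_append, countP_chunk,
        show ((n : Int) + 1) = ((n + 1 : Nat) : Int) by push_cast; ring,
        ih (n + 1) (by intro j; rw [show n + 1 + j = n + (j + 1) by omega, hsuf]; rfl),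
        hsuf 1]
      cases ts <;> simp [ends]

lemma Fk_eq (P : List (Int × List Int)) (k : List Int) :
    ((rowsOf P k).filter (fun r => decide ((r + 1) ∉ rowsOf P k))).length
      = (P.filter (fun p => decide (p.2 = k))).countP
          (fun p => decide ((p.1 + 1) ∉ rowsOf P p.2)) := by
  rw [← List.countP_eq_length_filter]
  show ((P.filter _).map (fun p => p.1)).countP _ = _
  rw [List.countP_map]
  refine List.countP_congr ?_
  intro p hp
  have h2 : p.2 = k := by simpa using (List.mem_filter.mp hp).2
  simp [Function.comp, h2]

lemma sum_map_cast (l : List (List Int)) (f : List Int → Nat) :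
    (l.map (fun k => ((f k : Nat) : Int))).sum = ((l.map f).sum : Int) := by
  induction l with
  | nil => simp
  | cons a l ih => simp [ih]

lemma b_eq_ends (matrix : List (List Int)) :
    findDifferentGoods_alt matrix = (ends (matrix.map bSegs) : Int) := by
  show ((pairsOf (matrix.map bSegs)).foldl keyStep []).foldl
      (fun total k => total + (((rowsOf (pairsOf (matrix.map bSegs)) k).filter
        (fun r => decide ((r + 1) ∉ rowsOf (pairsOf (matrix.map bSegs)) k))).length : Int)) 0
    = (ends (matrix.map bSegs) : Int)
  set T := matrix.map bSegs with hT
  rw [PySem.List.foldl_add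
    (g := fun k => (((rowsOf (pairsOf T) k).filter
      (fun r => decide ((r + 1) ∉ rowsOf (pairsOf T) k))).length : Int))]
  rw [sum_map_cast _ (fun k => ((rowsOf (pairsOf T) k).filter
      (fun r => decide ((r + 1) ∉ rowsOf (pairsOf T) k))).length)]
  rw [List.map_congr_left (fun k _ => Fk_eq (pairsOf T) k)]
  rw [group_countP _ _ _ (keys_nodup (pairsOf T) [] List.nodup_nil) (keys_mem (pairsOf T) [])]
  have h0 := step3 T T 0 (by intro j; rw [Nat.zero_add])
  simp only [Nat.cast_zero] at h0
  rw [show (pairsOf T).countP (fun p => decide ((p.1 + 1) ∉ rowsOf (pairsOf T) p.2)) = ends T from h0]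
  simp

-- ===== VERDICT (by name: the statement is the Claim_ definition above) =====
theorem findDifferentGoods_spec : Claim_equal_findDifferentGoods := by
  intro matrix _
  show findDifferentGoods matrix = findDifferentGoods_alt matrix
  rw [a_eq_ends, b_eq_ends]
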